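-- pv_equiv track=rewrite | github.com/alicewang96/interPract | 100916.py | earliest_duplicate
-- ===== SOURCE A (Python) =====
-- def earliest_duplicate(s):
-- 	earliest_duplicate = len(s) + 1
-- 	str_to_pos = {}
-- 	for i in range(len(s)):
-- 		c = s[i]
-- 		if (c not in str_to_pos.keys()):
-- 			str_to_pos[c] = i
-- 		else:
-- 			earliest_duplicate = min(earliest_duplicate, str_to_pos[c])
-- 	if earliest_duplicate == len(s) + 1:
-- 		return None
-- 	return s[earliest_duplicate]
-- ===== SOURCE B (Python) =====
-- def earliest_duplicate(s):
--     counts = {}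
--     for c in s:
--         counts[c] = counts.get(c, 0) + 1
--     for c in s:
--         if counts[c] > 1:
--             return c
--     return None
-- ===== Notes on version B (the rewrite author's own statement) =====
-- stated objective: simpler
-- what changed: Replaces the interleaved single pass that maintains a running minimum of first-occurrence positions in a dict with two plain passes: build a frequency table, then return the first character whose count exceeds one (no index arithmetic, no min tracking, no sentinel).
import Mathlib
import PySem

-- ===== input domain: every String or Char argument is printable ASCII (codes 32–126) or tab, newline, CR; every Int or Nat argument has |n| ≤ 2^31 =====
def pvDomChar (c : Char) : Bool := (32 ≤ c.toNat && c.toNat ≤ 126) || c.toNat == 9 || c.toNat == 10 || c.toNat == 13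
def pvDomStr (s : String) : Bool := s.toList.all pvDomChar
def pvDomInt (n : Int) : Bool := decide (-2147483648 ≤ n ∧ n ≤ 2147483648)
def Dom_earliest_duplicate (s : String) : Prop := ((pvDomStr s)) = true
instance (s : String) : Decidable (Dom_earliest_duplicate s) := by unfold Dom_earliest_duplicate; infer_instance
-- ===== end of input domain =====

-- B replaces A's single interleaved pass (dict of first positions + running minimum index)
-- with two plain passes — count all characters, then return the first one with count > 1 — for simplicity.

-- ===== PORT A =====
-- loop body of A: c = s[i]; if c not in str_to_pos: str_to_pos[c] = i else earliest = min(earliest, str_to_pos[c])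
def stepA (cs : List Char) (st : Int × PySem.Dict Char Int) (i : Int) : Int × PySem.Dict Char Int :=
  let c := PySem.List.pyGetD cs i 'A'   -- s[i]; i is always in range here
  match st.2.get? c with
  | none => (st.1, st.2.insert c i)
  | some p => (min st.1 p, st.2)

def earliest_duplicate (s : String) : Option String :=
  let cs := s.toList
  let n : Int := PySem.List.len cs
  let st := (PySem.List.pyRange 0 n 1).foldl (stepA cs) (n + 1, PySem.Dict.empty)
  if st.1 = n + 1 then none
  else (PySem.List.pyGet? cs st.1).map (fun c => String.ofList [c])

-- ===== PORT B =====
def earliest_duplicate_alt (s : String) : Option String :=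
  let cs := s.toList
  let counts := cs.foldl (fun (d : PySem.Dict Char Int) c => d.insert c (d.getD c 0 + 1)) PySem.Dict.empty
  match cs.find? (fun c => decide (1 < counts.getD c 0)) with
  | some c => some (String.ofList [c])
  | none => none

-- ===== PRECONDITION & SPEC =====
def Spec_earliest_duplicate (s : String) (out : Option String) : Prop := out = earliest_duplicate_alt s
instance (s : String) (out : Option String) : Decidable (Spec_earliest_duplicate s out) := by unfold Spec_earliest_duplicate; infer_instance

-- ===== CLAIM (what is proved, stated in full; the proofs are below) =====
def Claim_equal_earliest_duplicate : Prop := ∀ (s : String), Dom_earliest_duplicate s → Spec_earliest_duplicate s (earliest_duplicate s)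

-- ===== LEMMAS AND PROOFS =====

-- "is duplicated in xs"
def dupP (xs : List Char) : Char → Bool := fun c => decide (1 < xs.count c)

-- index of the first duplicated character, or the default L
def dupIdxD (L : Nat) (xs : List Char) : Nat := (xs.findIdx? (dupP xs)).getD L

lemma getD_map_succ (o : Option Nat) (L : Nat) (h : 1 ≤ L) :
    (o.map (· + 1)).getD L = o.getD (L - 1) + 1 := by
  cases o <;> simp <;> omega

lemma findIdx?_congr_mem {α : Type} (p q : α → Bool) (xs : List α)
    (h : ∀ x ∈ xs, p x = q x) : xs.findIdx? p = xs.findIdx? q := by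
  induction xs with
  | nil => rfl
  | cons x t ih =>
    rw [List.findIdx?_cons, List.findIdx?_cons, h x (List.mem_cons_self),
      ih (fun y hy => h y (List.mem_cons_of_mem _ hy))]

lemma findIdx?_or_getD {α : Type} (p q : α → Bool) (xs : List α) (L : Nat) (hL : xs.length ≤ L) :
    (xs.findIdx? (fun x => p x || q x)).getD L
      = min ((xs.findIdx? p).getD L) ((xs.findIdx? q).getD L) := by
  induction xs generalizing L with
  | nil => simp
  | cons x t ih =>
    have hL1 : 1 ≤ L := by simp at hL; omega
    rw [List.findIdx?_cons, List.findIdx?_cons, List.findIdx?_cons]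
    by_cases hp : p x = true
    · simp [hp]
    · by_cases hq : q x = true
      · simp [hp, hq]
      · rw [if_neg (by simp [hp, hq]), if_neg (by simp [hp]), if_neg (by simp [hq]),
          getD_map_succ _ L hL1, getD_map_succ _ L hL1, getD_map_succ _ L hL1,
          ih (L - 1) (by simp at hL; omega)]
        omega

lemma findIdx?_beq_getD (pre : List Char) (c : Char) (h : c ∈ pre) (L : Nat) :
    (pre.findIdx? (fun x => x == c)).getD L = pre.idxOf c := by
  cases hfi : pre.findIdx? (fun x => x == c) with
  | none =>
    rw [List.findIdx?_eq_none_iff] at hfi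
    exact absurd (hfi c h) (by simp)
  | some j =>
    rw [List.findIdx?_eq_some_iff_findIdx_eq] at hfi
    simp [List.idxOf, hfi.2]

lemma dupIdxD_append_not_mem (L : Nat) (pre : List Char) (c : Char) (h : c ∉ pre) :
    dupIdxD L (pre ++ [c]) = dupIdxD L pre := by
  unfold dupIdxD
  have hc0 : pre.count c = 0 := List.count_eq_zero.mpr h
  have hlast : List.findIdx? (dupP (pre ++ [c])) [c] = none := by
    simp [List.findIdx?_cons, dupP, List.count_append, hc0]
  rw [List.findIdx?_append, hlast]
  simp only [Option.map_none, Option.or_none]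
  rw [findIdx?_congr_mem (dupP (pre ++ [c])) (dupP pre) pre]
  intro x hx
  have hxc : (c == x) = false := beq_eq_false_iff_ne.mpr (fun hcx => h (hcx ▸ hx))
  simp [dupP, List.count_append, List.count_singleton, hxc]

lemma dupIdxD_append_mem (L : Nat) (pre : List Char) (c : Char) (h : c ∈ pre)
    (hL : pre.length ≤ L) :
    dupIdxD L (pre ++ [c]) = min (dupIdxD L pre) (pre.idxOf c) := by
  unfold dupIdxD
  have hcpos : 0 < pre.count c := List.count_pos_iff.mpr h
  have hcong : pre.findIdx? (dupP (pre ++ [c])) = pre.findIdx? (fun x => dupP pre x || (x == c)) := by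
    apply findIdx?_congr_mem
    intro x hx
    by_cases hxc : x = c
    · subst hxc
      have h1 : 1 < (pre ++ [x]).count x := by simp [List.count_append]; omega
      simp [dupP, h1, hx]
    · have h1 : (c == x) = false := beq_eq_false_iff_ne.mpr (Ne.symm hxc)
      have h2 : (x == c) = false := beq_eq_false_iff_ne.mpr hxc
      simp [dupP, List.count_append, List.count_singleton, h1, h2]
  have hsome : pre.findIdx? (dupP (pre ++ [c])) ≠ none := by
    rw [hcong]
    intro hn
    rw [List.findIdx?_eq_none_iff] at hn
    have := hn c h
    simp at this
  rw [List.findIdx?_append]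
  cases hfi : pre.findIdx? (dupP (pre ++ [c])) with
  | none => exact absurd hfi hsome
  | some j =>
    rw [Option.some_or, ← hfi, hcong, findIdx?_or_getD (dupP pre) (fun x => x == c) pre L hL,
      findIdx?_beq_getD pre c h L]

lemma find?_of_findIdx? {α : Type} (p : α → Bool) (xs : List α) (j : Nat)
    (h : xs.findIdx? p = some j) : xs.find? p = xs[j]? := by
  induction xs generalizing j with
  | nil => simp at h
  | cons x t ih =>
    rw [List.findIdx?_cons] at h
    by_cases hp : p x = true
    · simp [hp] at h
      subst h
      simp [List.find?_cons, hp]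
    · simp [hp] at h
      obtain ⟨j', hj', rfl⟩ := h
      simp [List.find?_cons, hp, ih j' hj']

lemma loopA (cs : List Char) : ∀ (post pre : List Char) (e : Int) (d : PySem.Dict Char Int),
    pre ++ post = cs →
    (∀ x, d.get? x = if x ∈ pre then some ((pre.idxOf x : Int)) else none) →
    e = (dupIdxD (cs.length + 1) pre : Int) →
    ((PySem.List.pyRange (pre.length : Int) (cs.length : Int) 1).foldl (stepA cs) (e, d)).1
      = (dupIdxD (cs.length + 1) cs : Int) := by
  intro post
  induction post with
  | nil =>
    intro pre e d hcat hd he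
    have : pre = cs := by simpa using hcat
    subst this
    rw [PySem.List.pyRange_one_eq_nil le_rfl]
    simpa using he
  | cons c rest ih =>
    intro pre e d hcat hd he
    have hlen : pre.length < cs.length := by
      rw [← hcat]; simp
    have hcast : (pre.length : Int) < (cs.length : Int) := by exact_mod_cast hlen
    rw [PySem.List.pyRange_one_cons hcast, List.foldl_cons]
    have hget : PySem.List.pyGetD cs (pre.length : Int) 'A' = c := by
      rw [PySem.List.pyGetD_natCast, List.getD_eq_getElem?_getD, ← hcat,
        List.getElem?_append_right le_rfl]
      simp
    have hcat' : (pre ++ [c]) ++ rest = cs := by rw [← hcat]; simp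
    have hlen' : ((pre ++ [c]).length : Int) = (pre.length : Int) + 1 := by
      simp
    by_cases hc : c ∈ pre
    · have hstep : stepA cs (e, d) (pre.length : Int) = (min e ((pre.idxOf c : Nat) : Int), d) := by
        simp [stepA, hget, hd c, hc]
      rw [hstep]
      have := ih (pre ++ [c]) (min e ((pre.idxOf c : Nat) : Int)) d hcat'
        (by
          intro x
          rw [hd x]
          by_cases hx : x ∈ pre
          · simp [hx, List.idxOf_append, hc]
          · have : x ∉ pre ++ [c] ∨ x = c := by
              by_cases hxc : x = c
              · right; exact hxc
              · left; simp [hx, hxc]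
            rcases this with h1 | h1
            · simp [hx, h1]
            · subst h1; exact absurd hc hx
          )
        (by
          rw [he, dupIdxD_append_mem (cs.length + 1) pre c hc (by omega)]
          push_cast [Nat.cast_min]
          rfl)
      rw [← this, hlen']
    · have hstep : stepA cs (e, d) (pre.length : Int) = (e, d.insert c (pre.length : Int)) := by
        simp [stepA, hget, hd c, hc]
      rw [hstep]
      have := ih (pre ++ [c]) e (d.insert c (pre.length : Int)) hcat'
        (by
          intro x
          rw [PySem.Dict.get?_insert, hd x]
          by_cases hxc : x = c
          · subst hxc
            simp [hc, List.idxOf_append]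
          · by_cases hx : x ∈ pre
            · simp [hxc, hx, List.idxOf_append]
            · simp [hxc, hx]
          )
        (by rw [he, dupIdxD_append_not_mem (cs.length + 1) pre c hc])
      rw [← this, hlen']

lemma counts_pred_eq (cs : List Char) :
    (fun c => decide (1 < (cs.foldl (fun (d : PySem.Dict Char Int) c => d.insert c (d.getD c 0 + 1)) PySem.Dict.empty).getD c 0))
      = dupP cs := by
  funext c
  rw [PySem.Dict.getD_foldl_insert_add_one]
  simp [dupP, PySem.Dict.getD_empty]

lemma main_eq (s : String) : earliest_duplicate s = earliest_duplicate_alt s := by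
  simp only [earliest_duplicate, earliest_duplicate_alt, PySem.List.len_eq]
  set cs := s.toList with hcs
  have h0 : ((List.length ([] : List Char)) : Int) = 0 := by simp
  have hloop := loopA cs cs [] ((cs.length : Int) + 1) PySem.Dict.empty (by simp)
    (by intro x; simp [PySem.Dict.get?_empty])
    (by simp [dupIdxD])
  rw [h0] at hloop
  rw [hloop, counts_pred_eq cs]
  cases hfi : cs.findIdx? (dupP cs) with
  | none =>
    have hfind : cs.find? (dupP cs) = none := by
      rw [List.find?_eq_none]
      rw [List.findIdx?_eq_none_iff] at hfi
      intro x hx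
      simp [hfi x hx]
    rw [hfind]
    have : dupIdxD (cs.length + 1) cs = cs.length + 1 := by simp [dupIdxD, hfi]
    rw [this]
    simp
  | some j =>
    have hj : j < cs.length := by
      rw [List.findIdx?_eq_some_iff_findIdx_eq] at hfi
      exact hfi.1
    have hdup : dupIdxD (cs.length + 1) cs = j := by simp [dupIdxD, hfi]
    rw [hdup]
    rw [if_neg (by push_cast; omega)]
    rw [find?_of_findIdx? (dupP cs) cs j hfi]
    rw [PySem.List.pyGet?_natCast, List.getElem?_eq_getElem hj]
    rfl

-- ===== VERDICT (by name: the statement is the Claim_ definition above) =====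
theorem earliest_duplicate_spec : Claim_equal_earliest_duplicate := by
  intro s _
  exact main_eq s
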